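-- pv_equiv track=rewrite | github.com/coopers/pramp | busiest_time_in_the_mall.py | find_busiest_period
-- ===== SOURCE A (Python) =====
-- def find_busiest_period(data):
--     N = len(data)
--     busy_time = None
--     max_count = None
--     count = 0
--     for i in range(N):
--         time, amount, is_positive = data[i]
--         count += amount * (1 if is_positive else -1)
--         if i < N - 1 and data[i + 1][0] == time:
--             continue
--
--         if max_count is None or count > max_count:
--             max_count = count
--             busy_time = time
--
--     return busy_time
-- ===== SOURCE B (Python) =====
-- from itertools import accumulate
--
--
-- def find_busiest_period(data):
--     if not data:
--         return None
--     # staged pipeline: prefix sums of signed deltas, boundary candidates, then argmax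
--     counts = list(accumulate(amount if is_positive else -amount
--                              for _, amount, is_positive in data))
--     cands = [(c, t)
--              for (t, _, _), c, nxt in zip(data, counts, list(data[1:]) + [None])
--              if nxt is None or nxt[0] != t]
--     m = max(c for c, _ in cands)
--     return next(t for c, t in cands if c == m)
-- ===== Notes on version B (the rewrite author's own statement) =====
-- stated objective: alternative
-- what changed: Replaces A's online single pass with running count and running max by a staged pipeline: accumulate prefix sums of signed deltas, filter the timestamp-boundary candidates, take the maximum count, and return the time of its first occurrence.
import Mathlib
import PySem

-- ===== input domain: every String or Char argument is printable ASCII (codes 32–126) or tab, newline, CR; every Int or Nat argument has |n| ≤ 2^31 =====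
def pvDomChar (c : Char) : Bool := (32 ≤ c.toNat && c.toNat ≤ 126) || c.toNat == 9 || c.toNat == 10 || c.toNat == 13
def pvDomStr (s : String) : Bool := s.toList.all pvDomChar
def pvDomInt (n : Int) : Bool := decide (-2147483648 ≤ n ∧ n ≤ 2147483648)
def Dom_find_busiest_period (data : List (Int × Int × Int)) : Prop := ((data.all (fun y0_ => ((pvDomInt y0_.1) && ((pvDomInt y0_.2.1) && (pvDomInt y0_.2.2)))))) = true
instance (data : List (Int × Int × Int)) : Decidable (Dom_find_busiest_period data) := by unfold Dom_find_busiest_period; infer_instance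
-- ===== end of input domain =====

-- B replaces A's online loop (running count + running max) by a staged pipeline:
-- prefix sums of signed deltas, boundary candidates, max, first occurrence (alternative; same O(n) cost).

-- ===== PORT A =====
-- loop state: (busy_time, max_count, count); the `i < N-1 and data[i+1][0] == time`
-- look-ahead is the head of the remaining list, transcribed step for step
def findBusyGoA : List (Int × Int × Int) → Option Int → Option Int → Int → Option Int
  | [], busy_time, _, _ => busy_time
  | (time, amount, is_positive) :: rest, busy_time, max_count, count =>
    let count := count + amount * (if is_positive ≠ 0 then 1 else -1)
    if (match rest with | (t', _, _) :: _ => t' == time | [] => false) then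
      findBusyGoA rest busy_time max_count count
    else
      match max_count with
      | none => findBusyGoA rest (some time) (some count) count
      | some m => if count > m then findBusyGoA rest (some time) (some count) count
                  else findBusyGoA rest busy_time max_count count

def find_busiest_period (data : List (Int × Int × Int)) : Option Int :=
  findBusyGoA data none none 0

-- ===== PORT B =====
-- signed deltas: `amount if is_positive else -amount`
def altDeltas (data : List (Int × Int × Int)) : List Int :=
  data.map (fun e => if e.2.2 ≠ 0 then e.2.1 else -e.2.1)

-- itertools.accumulate (running prefix sums)
def altAccum : Int → List Int → List Int
  | _, [] => []
  | c, d :: ds => (c + d) :: altAccum (c + d) ds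

-- the comprehension `[(c, t) for (t,..), c, nxt in zip(data, counts, shifted) if nxt is None or nxt[0] != t]`
-- over (time, count) pairs; `nxt` is the next pair of the same zipped sequence
def altCands : List (Int × Int) → List (Int × Int)
  | [] => []
  | (t, c) :: rest =>
    (match rest with
     | (t', _) :: _ => if t' ≠ t then [(c, t)] else []
     | [] => [(c, t)]) ++ altCands rest

def find_busiest_period_alt (data : List (Int × Int × Int)) : Option Int :=
  if data = [] then none
  else
    let counts := altAccum 0 (altDeltas data)
    let cands := altCands ((data.map (fun e => e.1)).zip counts)
    match cands with
    | [] => none   -- unreachable: cands of nonempty data is nonempty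
    | (c0, _) :: rest0 =>
      let m := rest0.foldl (fun acc p => max acc p.1) c0   -- max(c for c, _ in cands)
      match cands.find? (fun p => p.1 == m) with           -- next(t for c, t in cands if c == m)
      | some p => some p.2
      | none => none   -- unreachable: the max is attained

-- ===== PRECONDITION & SPEC =====
def Spec_find_busiest_period (data : List (Int × Int × Int)) (out : Option Int) : Prop := out = find_busiest_period_alt data
instance (data : List (Int × Int × Int)) (out : Option Int) : Decidable (Spec_find_busiest_period data out) := by unfold Spec_find_busiest_period; infer_instance

-- ===== CLAIM (what is proved, stated in full; the proofs are below) =====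
def Claim_equal_find_busiest_period : Prop := ∀ (data : List (Int × Int × Int)), Dom_find_busiest_period data → Spec_find_busiest_period data (find_busiest_period data)

-- ===== LEMMAS AND PROOFS =====

-- the running-max loop A performs, abstracted over the list of (count, time) candidates
def pvRunMax : List (Int × Int) → Option Int → Option Int → Option Int
  | [], busy, _ => busy
  | (c, t) :: L, busy, mc =>
    match mc with
    | none => pvRunMax L (some t) (some c)
    | some m => if c > m then pvRunMax L (some t) (some c) else pvRunMax L busy (some m)

theorem pvRunMaxA (data : List (Int × Int × Int)) :
    ∀ (c : Int) (busy mc : Option Int),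
      findBusyGoA data busy mc c
        = pvRunMax (altCands ((data.map (fun e => e.1)).zip (altAccum c (altDeltas data)))) busy mc := by
  induction data with
  | nil => intro c busy mc; rfl
  | cons e rest ih =>
    obtain ⟨t, a, p⟩ := e
    intro c busy mc
    have hd : c + a * (if p ≠ 0 then 1 else -1) = c + (if p ≠ 0 then a else -a) := by
      split <;> ring
    cases rest with
    | nil =>
      simp only [findBusyGoA, altDeltas, altAccum, List.map, List.zip, List.zipWith, altCands,
        List.singleton_append, hd]
      cases mc <;> simp [pvRunMax]
    | cons e' rest' =>
      obtain ⟨t', a', p'⟩ := e'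
      -- one unfolding step of the candidate pipeline, stated as a definitional equality
      have hcz : altCands ((((t, a, p) :: (t', a', p') :: rest').map (fun e => e.1)).zip
                    (altAccum c (altDeltas ((t, a, p) :: (t', a', p') :: rest'))))
          = (if t' ≠ t then [((c + (if p ≠ 0 then a else -a)), t)] else [])
            ++ altCands ((((t', a', p') :: rest').map (fun e => e.1)).zip
                 (altAccum (c + (if p ≠ 0 then a else -a)) (altDeltas ((t', a', p') :: rest')))) := rfl
      by_cases ht : t' = t
      · subst ht
        have stepA : findBusyGoA ((t', a, p) :: (t', a', p') :: rest') busy mc c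
            = findBusyGoA ((t', a', p') :: rest') busy mc (c + a * (if p ≠ 0 then 1 else -1)) := by
          rw [findBusyGoA.eq_def]; simp
        rw [stepA, hd, hcz]
        rw [if_neg (show ¬ t' ≠ t' from fun h => h rfl), List.nil_append]
        exact ih _ _ _
      · have hne : (t' == t) = false := by simp [ht]
        rw [findBusyGoA.eq_def]
        simp only [hne, Bool.false_eq_true, if_false, hd]
        rw [hcz]
        simp only [ne_eq, ht, not_false_iff, if_true, List.singleton_append, pvRunMax]
        cases mc with
        | none => exact ih _ _ _
        | some m =>
          simp only [gt_iff_lt]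
          split_ifs <;> exact ih _ _ _

theorem pv_le_foldl_max (L : List (Int × Int)) : ∀ init : Int,
    init ≤ L.foldl (fun acc p => max acc p.1) init := by
  induction L with
  | nil => intro init; simp
  | cons x L ih =>
    intro init
    exact le_trans (le_max_left init x.1) (ih (max init x.1))

theorem pvRunMax_max (L : List (Int × Int)) : ∀ (b m : Int),
    pvRunMax L (some b) (some m)
      = (if L.foldl (fun acc p => max acc p.1) m ≤ m then some b
         else Option.map Prod.snd (L.find? (fun p => p.1 == L.foldl (fun acc p => max acc p.1) m))) := by
  induction L with
  | nil => intro b m; simp [pvRunMax]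
  | cons x L ih =>
    obtain ⟨c, t⟩ := x
    intro b m
    simp only [pvRunMax, List.foldl]
    by_cases hc : c > m
    · have hmx : max m c = c := by omega
      rw [if_pos hc, ih t c, hmx]
      have hM := pv_le_foldl_max L c
      by_cases hMc : L.foldl (fun acc p => max acc p.1) c ≤ c
      · have hMeq : L.foldl (fun acc p => max acc p.1) c = c := le_antisymm hMc hM
        rw [if_pos hMc, if_neg (by omega), List.find?]
        simp [hMeq]
      · rw [if_neg hMc, if_neg (by omega), List.find?]
        have : (c == L.foldl (fun acc p => max acc p.1) c) = false := by
          simp; omega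
        simp [this]
    · have hmx : max m c = m := by omega
      rw [if_neg hc, ih b m, hmx]
      by_cases hMm : L.foldl (fun acc p => max acc p.1) m ≤ m
      · rw [if_pos hMm, if_pos hMm]
      · rw [if_neg hMm, if_neg hMm, List.find?]
        have : (c == L.foldl (fun acc p => max acc p.1) m) = false := by
          simp; omega
        simp [this]

theorem pvCands_ne_nil : ∀ (L : List (Int × Int)), L ≠ [] → altCands L ≠ [] := by
  intro L
  induction L with
  | nil => simp
  | cons x L ih =>
    obtain ⟨t, c⟩ := x
    intro _
    cases L with
    | nil => simp [altCands]
    | cons y L' =>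
      obtain ⟨t', c'⟩ := y
      have hstep : altCands ((t, c) :: (t', c') :: L')
          = (if t' ≠ t then [(c, t)] else []) ++ altCands ((t', c') :: L') := rfl
      rw [hstep]
      intro h
      exact ih (by simp) (List.append_eq_nil_iff.mp h).2

-- ===== VERDICT (by name: the statement is the Claim_ definition above) =====
theorem find_busiest_period_spec : Claim_equal_find_busiest_period := by
  intro data _
  unfold Spec_find_busiest_period find_busiest_period find_busiest_period_alt
  rw [pvRunMaxA data 0 none none]
  cases data with
  | nil => rfl
  | cons e rest =>
    simp only [if_neg (List.cons_ne_nil e rest)]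
    cases hz : (((e :: rest).map (fun e => e.1)).zip (altAccum 0 (altDeltas (e :: rest)))) with
    | nil =>
      exfalso
      obtain ⟨t, a, p⟩ := e
      simp [altDeltas, altAccum, List.zip] at hz
    | cons z zs =>
      cases hc : altCands (z :: zs) with
      | nil => exact absurd hc (pvCands_ne_nil (z :: zs) (by simp))
      | cons c0 rest0 =>
        obtain ⟨cc, tt⟩ := c0
        simp only [pvRunMax]
        rw [pvRunMax_max rest0 tt cc]
        have hM := pv_le_foldl_max rest0 cc
        by_cases hle : rest0.foldl (fun acc p => max acc p.1) cc ≤ cc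
        · have hMeq : rest0.foldl (fun acc p => max acc p.1) cc = cc := le_antisymm hle hM
          rw [if_pos hle, List.find?]
          simp [hMeq]
        · rw [if_neg hle, List.find?]
          have : (cc == rest0.foldl (fun acc p => max acc p.1) cc) = false := by
            simp; omega
          rw [this]
          cases rest0.find? (fun p => p.1 == rest0.foldl (fun acc p => max acc p.1) cc) <;> rfl
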